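-- pv_equiv track=rewrite | github.com/Solwet/Flash | 1.py | f
-- ===== SOURCE A (Python) =====
-- def f(N):
--     a=''
--     mas=[]
--     n=bin(N)[2:]
--     for i in range(len(n)):
--         mas.append(n[i])
--     for i in range(1,len(mas),2):
--         mas[i]=1
--     for i in range(len(mas)):
--         a += str(mas[i])
--     return int(a,2)
-- ===== SOURCE B (Python) =====
-- def f(N):
--     # One pass over the binary digits: accumulate the result arithmetically,
--     # forcing every odd-index digit to 1.
--     s = bin(N)[2:]
--     total = 0
--     for i, c in enumerate(s):
--         total = total * 2 + (1 if i % 2 == 1 or c == '1' else 0)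
--     return total
-- ===== Notes on version B (the rewrite author's own statement) =====
-- stated objective: simpler
-- what changed: A makes three index loops (copy the digit string into a list, mutate odd indices to 1, rebuild a string) and re-parses it with int(.,2); B computes the integer directly in a single enumerate pass with an arithmetic accumulator, never building the intermediate list or string.
import Mathlib
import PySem

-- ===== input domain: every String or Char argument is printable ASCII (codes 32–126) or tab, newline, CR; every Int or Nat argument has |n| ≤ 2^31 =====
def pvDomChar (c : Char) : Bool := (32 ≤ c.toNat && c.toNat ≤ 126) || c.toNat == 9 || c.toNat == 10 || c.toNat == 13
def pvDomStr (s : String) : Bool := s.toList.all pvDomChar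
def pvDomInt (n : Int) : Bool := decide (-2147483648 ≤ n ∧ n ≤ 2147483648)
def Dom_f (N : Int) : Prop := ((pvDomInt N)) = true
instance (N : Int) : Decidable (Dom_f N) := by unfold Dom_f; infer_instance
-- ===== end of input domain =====

-- B replaces A's three index loops (copy digits to a list, set odd indices, rebuild a string)
-- and the final int(.,2) parse by one enumerate pass with an arithmetic accumulator (objective: simpler).
-- Pre_f excludes negative N, on which A raises ValueError (bin(N)[2:] keeps a 'b' that int(a,2) rejects).


-- ===== PORT A =====

-- bin(n)[2:] for n ≥ 0 (shared with B, like Python's bin): binary digits, most significant first.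
def binDigitsGo : Nat → List Char → List Char
  | 0, acc => acc
  | (n+1), acc => binDigitsGo ((n+1)/2) ((if (n+1) % 2 = 1 then '1' else '0') :: acc)
  decreasing_by exact Nat.div_lt_self (Nat.succ_pos n) one_lt_two

def binDigits (n : Nat) : List Char := if n = 0 then ['0'] else binDigitsGo n []

-- bin(N)[2:]: for negative N the slice keeps the 'b' of '-0b…' followed by the digits of |N|.
def binSlice (N : Int) : List Char :=
  if N < 0 then 'b' :: binDigits N.natAbs else binDigits N.toNat

def isBinDigit (c : Char) : Bool := c = '0' || c = '1'

-- the numeric value int(a,2) computes when it succeeds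
def parseBin (l : List Char) : Int :=
  l.foldl (fun acc c => acc * 2 + (if c = '1' then 1 else 0)) 0

def f (N : Int) : Int :=
  let n := binSlice N
  -- for i in range(len(n)): mas.append(n[i])   (index always in range, default never used)
  let mas := (PySem.List.pyRange 0 (PySem.List.len n)).foldl
      (fun m i => m ++ [PySem.List.pyGetD n i ' ']) []
  -- for i in range(1,len(mas),2): mas[i]=1  — str(1)='1', so stored as the char '1';
  -- i ≥ 1 so i.toNat is exact
  let mas2 := (PySem.List.pyRange 1 (PySem.List.len mas) 2).foldl
      (fun m i => m.set i.toNat '1') mas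
  -- for i in range(len(mas)): a += str(mas[i])  (str of a char is itself, of the int 1 is '1')
  let a := (PySem.List.pyRange 0 (PySem.List.len mas2)).foldl
      (fun acc i => acc ++ [PySem.List.pyGetD mas2 i ' ']) []
  -- int(a,2) raises ValueError unless a is a nonempty run of binary digits (guaranteed under
  -- Pre_f); the guard only makes the port total, the default branch is never reached on Pre_f
  if a ≠ [] ∧ a.all isBinDigit then parseBin a else 0

-- ===== PORT B =====
def f_alt (N : Int) : Int :=
  let s := binSlice N
  (PySem.List.enumerate s).foldl
    (fun total ic => total * 2 + (if PySem.Int.mod ic.1 2 = 1 ∨ ic.2 = '1' then 1 else 0)) 0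

-- ===== PRECONDITION & SPEC =====
-- Pre_f excludes negative N: there A's final int(a,2) raises ValueError (the slice keeps a 'b').
def Pre_f (N : Int) : Prop := 0 ≤ N
instance (N : Int) : Decidable (Pre_f N) := by unfold Pre_f; infer_instance
def pvWitness_f : Int := 11

def Spec_f (N : Int) (out : Int) : Prop := out = f_alt N
instance (N : Int) (out : Int) : Decidable (Spec_f N out) := by unfold Spec_f; infer_instance

-- ===== CLAIM (what is proved, stated in full; the proofs are below) =====
def Claim_equal_f : Prop := ∀ (N : Int), Dom_f N → Pre_f N → Spec_f N (f N)

-- ===== LEMMAS AND PROOFS =====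

-- the copy loops: folding append of pyGetD over range(len(xs)) rebuilds xs
theorem copy_loop (xs : List Char) :
    (PySem.List.pyRange 0 (PySem.List.len xs)).foldl
      (fun m i => m ++ [PySem.List.pyGetD xs i ' ']) [] = xs := by
  rw [PySem.List.foldl_pyRange_zero_pyGetD xs ' ' (fun acc c => acc ++ [c]) []]
  induction xs using List.reverseRecOn with
  | nil => rfl
  | append_singleton t c ih => simp [List.foldl_append, ih]

theorem length_setfold (idxs : List Int) (m : List Char) :
    (idxs.foldl (fun m i => m.set i.toNat '1') m).length = m.length := by
  induction idxs generalizing m with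
  | nil => rfl
  | cons i rest ih => simp [List.foldl_cons, ih]

theorem getElem?_setfold (idxs : List Int) (m : List Char) (j : Nat)
    (hpos : ∀ i ∈ idxs, 0 ≤ i) :
    (idxs.foldl (fun m i => m.set i.toNat '1') m)[j]? =
      if (j : Int) ∈ idxs then (m.set j '1')[j]? else m[j]? := by
  induction idxs generalizing m with
  | nil => simp
  | cons i rest ih =>
    have hi : 0 ≤ i := hpos i (by simp)
    rw [List.foldl_cons, ih _ (fun x hx => hpos x (by simp [hx]))]
    by_cases hr : (j : Int) ∈ rest
    · simp only [hr, if_pos, List.mem_cons, or_true]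
      simp [List.getElem?_set, List.length_set]
    · by_cases hij : i = (j : Int)
      · have : i.toNat = j := by omega
        simp [hr, hij]
      · have hne : i.toNat ≠ j := by omega
        have hji : ¬ ((j : Int) = i) := fun h => hij h.symm
        rw [List.getElem?_set]
        simp [hji, hr, hne]

-- odd-membership in range(1, L, 2)
theorem mem_pyRange_two (L : Int) (j : Nat) :
    ((j : Int) ∈ PySem.List.pyRange 1 L 2) ↔ (j % 2 = 1 ∧ (j : Int) < L) := by
  rw [PySem.List.mem_pyRange_iff_of_pos (by norm_num)]
  constructor
  · rintro ⟨h1, h2, h3⟩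
    refine ⟨?_, h2⟩
    omega
  · rintro ⟨h1, h2⟩
    refine ⟨by omega, h2, by omega⟩

theorem int_mod_two (k : Int) : PySem.Int.mod k 2 = k % 2 := by
  simp [PySem.Int.mod, Int.fmod_eq_emod]

-- the heart: parsing a list whose entries are s's digits with odd positions forced to '1'
-- equals B's enumerate fold
theorem parse_eq_enum (s : List Char) : ∀ (m : List Char) (k : Nat) (acc : Int),
    m.length = s.length →
    (∀ j : Nat, j < s.length → m[j]? = if (k + j) % 2 = 1 then some '1' else s[j]?) →
    m.foldl (fun acc c => acc * 2 + (if c = '1' then 1 else 0)) acc =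
      (PySem.List.enumerate s (k : Int)).foldl
        (fun total ic => total * 2 + (if PySem.Int.mod ic.1 2 = 1 ∨ ic.2 = '1' then 1 else 0)) acc := by
  induction s with
  | nil =>
    intro m k acc hlen _
    have : m = [] := List.eq_nil_of_length_eq_zero hlen
    simp [this, PySem.List.enumerate]
  | cons c t ih =>
    intro m k acc hlen hchar
    match m, hlen with
    | d :: mt, hlen =>
      have hd : d = if k % 2 = 1 then '1' else c := by
        have h := hchar 0 (by simp)
        by_cases hk : k % 2 = 1 <;> simp [hk] at h <;> simp [hk, h]
      rw [PySem.List.enumerate_cons, List.foldl_cons, List.foldl_cons]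
      have hacc : acc * 2 + (if d = '1' then 1 else 0) =
          acc * 2 + (if PySem.Int.mod (k : Int) 2 = 1 ∨ c = '1' then (1:Int) else 0) := by
        rw [int_mod_two]
        by_cases hk : k % 2 = 1
        · have hk' : ((k : Int)) % 2 = 1 := by omega
          simp [hd, hk, hk']
        · have hk' : ¬ ((k : Int)) % 2 = 1 := by omega
          by_cases hc : c = '1' <;> simp [hd, hk, hk', hc]
      rw [hacc]
      have : ((k : Int) + 1) = ((k + 1 : Nat) : Int) := by push_cast; ring
      rw [this]
      apply ih mt (k + 1) _ (by simpa using hlen)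
      intro j hj
      have := hchar (j + 1) (by simpa using Nat.succ_lt_succ hj)
      have harith : (k + (j + 1)) % 2 = (k + 1 + j) % 2 := by omega
      simpa [harith] using this

-- the digit lists bin produces consist of '0'/'1' and are nonempty
theorem binDigitsGo_all (n : Nat) : ∀ acc : List Char,
    acc.all isBinDigit → (binDigitsGo n acc).all isBinDigit := by
  induction n using Nat.strong_induction_on with
  | _ n ih =>
    intro acc h
    match n with
    | 0 => simpa [binDigitsGo] using h
    | (m + 1) =>
      rw [binDigitsGo]
      refine ih _ (Nat.div_lt_self (Nat.succ_pos m) one_lt_two) _ ?_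
      simp only [List.all_cons, h, Bool.and_true]
      by_cases hm : (m + 1) % 2 = 1 <;> simp [hm, isBinDigit]

theorem binDigits_all (n : Nat) : (binDigits n).all isBinDigit := by
  unfold binDigits
  split
  · simp [isBinDigit]
  · exact binDigitsGo_all n [] (by simp)

theorem binDigitsGo_length (n : Nat) : ∀ acc : List Char,
    acc.length ≤ (binDigitsGo n acc).length := by
  induction n using Nat.strong_induction_on with
  | _ n ih =>
    intro acc
    match n with
    | 0 => simp [binDigitsGo]
    | (m + 1) =>
      rw [binDigitsGo]
      have := ih _ (Nat.div_lt_self (Nat.succ_pos m) one_lt_two)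
        ((if (m + 1) % 2 = 1 then '1' else '0') :: acc)
      simp only [List.length_cons] at this
      omega

theorem binDigits_ne_nil (n : Nat) : binDigits n ≠ [] := by
  unfold binDigits
  split
  · simp
  · next h =>
    obtain ⟨m, rfl⟩ : ∃ m, n = m + 1 := ⟨n - 1, by omega⟩
    rw [binDigitsGo]
    have := binDigitsGo_length ((m + 1) / 2) ((if (m + 1) % 2 = 1 then '1' else '0') :: [])
    intro hnil
    rw [hnil] at this
    simp at this

theorem setfold_all (idxs : List Int) : ∀ m : List Char,
    m.all isBinDigit → (idxs.foldl (fun m i => m.set i.toNat '1') m).all isBinDigit := by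
  induction idxs with
  | nil => intro m h; exact h
  | cons i rest ih =>
    intro m h
    rw [List.foldl_cons]
    refine ih _ ?_
    rw [List.all_eq_true] at h ⊢
    intro x hx
    rcases List.mem_or_eq_of_mem_set hx with hx | rfl
    · exact h x hx
    · simp [isBinDigit]

-- ===== VERDICT (by name: the statement is the Claim_ definition above) =====
theorem f_spec : Claim_equal_f := by
  intro N _ hpre
  have hneg : ¬ N < 0 := by unfold Pre_f at hpre; omega
  unfold Spec_f f f_alt
  simp only [binSlice, if_neg hneg]
  set s := binDigits N.toNat with hs
  rw [copy_loop s]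
  set idxs := PySem.List.pyRange 1 (PySem.List.len s) 2 with hidxs
  set m2 := idxs.foldl (fun m i => m.set i.toNat '1') s with hm2
  -- third loop copies m2
  rw [copy_loop m2]
  have hpos : ∀ i ∈ idxs, 0 ≤ i := by
    intro i hi
    rw [hidxs, PySem.List.mem_pyRange_iff_of_pos (by norm_num)] at hi
    omega
  have hlen2 : m2.length = s.length := length_setfold idxs s
  have hvalid : m2 ≠ [] ∧ m2.all isBinDigit := by
    constructor
    · intro hnil
      have := binDigits_ne_nil N.toNat
      rw [← hs] at this
      apply this
      have : s.length = 0 := by rw [← hlen2, hnil]; rfl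
      exact List.eq_nil_of_length_eq_zero this
    · exact setfold_all idxs s (by rw [hs]; exact binDigits_all N.toNat)
  rw [if_pos hvalid]
  unfold parseBin
  have h0 : ((0 : Nat) : Int) = 0 := rfl
  rw [← h0]
  apply parse_eq_enum s m2 0 0 hlen2
  intro j hj
  rw [hm2, getElem?_setfold idxs s j hpos]
  have hmem : ((j : Int) ∈ idxs) ↔ (j % 2 = 1 ∧ (j : Int) < PySem.List.len s) := by
    rw [hidxs]; exact mem_pyRange_two _ j
  have hlt : (j : Int) < PySem.List.len s := by simp [PySem.List.len]; omega
  by_cases hodd : j % 2 = 1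
  · rw [if_pos (hmem.mpr ⟨hodd, hlt⟩), List.getElem?_set]
    simp [hj, hodd]
  · rw [if_neg (fun h => hodd (hmem.mp h).1)]
    simp [hodd]
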